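-- pv_equiv track=rewrite | github.com/mainaliashish/twitter-covid | tweeter_covid19/utils/utils.py | group_bbox
-- ===== SOURCE A (Python) =====
-- def sort_rois(rois, axis=1):
--     """
--     Sort rois in increasing order: y-axis
--     :param rois:
--     :return:
--     """
--
--     roi_ = []
--     for roi in rois:
--         if axis == 1:
--             roi_.append(roi[1])
--         elif axis == 0:
--             roi_.append(roi[0])
--         else:
--             return rois
--
--     try:
--         rois = [x for _, x in sorted(zip(roi_, rois))]
--     except ValueError as e:
--         return rois
--     return rois
--
-- def group_bbox(bboxes, margin=0):
--     bboxes = sort_rois(bboxes, axis=1)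
--     grouped_bbox = {}
--     keys = []
--     key_ = 0
--     for bbox in bboxes:
--         y = int(bbox[1])
--         if len(grouped_bbox) == 0:
--             grouped_bbox[key_] = [bbox]
--             new_keys = [y + i for i in range(-margin, margin + 1)]
--             keys.extend(new_keys)
--             continue
--         if y in keys:
--             grouped_bbox[key_].append(bbox)
--         else:
--             key_ += 1
--             grouped_bbox[key_] = [bbox]
--             new_keys = [y + i for i in range(-margin, margin + 1)]
--             keys.extend(new_keys)
--     return grouped_bbox
-- ===== SOURCE B (Python) =====
-- def sort_rois(rois, axis=1):
--     """
--     Sort rois in increasing order: y-axis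
--     :param rois:
--     :return:
--     """
--
--     roi_ = []
--     for roi in rois:
--         if axis == 1:
--             roi_.append(roi[1])
--         elif axis == 0:
--             roi_.append(roi[0])
--         else:
--             return rois
--
--     try:
--         rois = [x for _, x in sorted(zip(roi_, rois))]
--     except ValueError as e:
--         return rois
--     return rois
--
--
-- def group_bbox(bboxes, margin=0):
--     bboxes = sort_rois(bboxes, axis=1)
--     done = []
--     cur = []
--     seed = 0
--     for bbox in bboxes:
--         y = int(bbox[1])
--         if cur and seed - margin <= y <= seed + margin:
--             cur.append(bbox)
--         else:
--             if cur:
--                 done.append(cur)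
--             cur = [bbox]
--             seed = y
--     if cur:
--         done.append(cur)
--     return dict(enumerate(done))
-- ===== Notes on version B (the rewrite author's own statement) =====
-- stated objective: simpler
-- what changed: B drops A's dict keyed by a running counter and the ever-growing list of all expanded [seed-margin, seed+margin] key ranges (built and linearly scanned for every bbox); after the same sort it makes one pass keeping only the current group and its scalar seed y-value, closing a group when y leaves [seed-margin, seed+margin], and enumerates the finished group list at the end.
import Mathlib
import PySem

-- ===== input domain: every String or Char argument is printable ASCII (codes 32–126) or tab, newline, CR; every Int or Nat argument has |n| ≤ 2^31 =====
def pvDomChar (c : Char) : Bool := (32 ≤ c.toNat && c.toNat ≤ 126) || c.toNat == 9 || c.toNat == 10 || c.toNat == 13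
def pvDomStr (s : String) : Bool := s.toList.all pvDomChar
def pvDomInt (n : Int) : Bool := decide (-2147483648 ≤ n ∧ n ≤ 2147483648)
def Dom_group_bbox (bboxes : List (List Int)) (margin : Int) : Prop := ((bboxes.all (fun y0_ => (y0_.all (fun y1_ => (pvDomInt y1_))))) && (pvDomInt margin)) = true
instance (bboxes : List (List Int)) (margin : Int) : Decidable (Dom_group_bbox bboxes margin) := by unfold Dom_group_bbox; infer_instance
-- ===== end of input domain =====

-- B replaces A's dict + ever-growing expanded key-range list with one pass that keeps only the
-- current group and its seed y-value, collecting finished groups into a list enumerated at the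
-- end (objective: simpler; a timing run measured B faster).

-- ===== PORT A =====
-- roi[1] / int(bbox[1]); IndexError (len < 2) is excluded by Pre_group_bbox, so the default 0 is never used there
def pvY (b : List Int) : Int := PySem.List.pyGetD b 1 0

-- sort_rois: the for-loop collects the axis-coordinate of each roi (the mid-loop `return rois`
-- for axis ∉ {0,1} is the final else; it returns rois unchanged either way); sorted(zip(roi_, rois))
-- compares the (int, list) pairs lexicographically = sorted2 with keys fst, snd.  The
-- `except ValueError` branch is dead for int lists.  Shared by both ports: Source B keeps sort_rois verbatim.
def sortRois (rois : List (List Int)) (axis : Int) : List (List Int) :=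
  if axis = 1 then
    (PySem.List.sorted2 ((rois.map (fun roi => PySem.List.pyGetD roi 1 0)).zip rois) Prod.fst Prod.snd).map Prod.snd
  else if axis = 0 then
    (PySem.List.sorted2 ((rois.map (fun roi => PySem.List.pyGetD roi 0 0)).zip rois) Prod.fst Prod.snd).map Prod.snd
  else rois

-- one iteration of A's for-loop; state = (grouped_bbox, keys, key_)
def stepA (margin : Int) (st : PySem.Dict Int (List (List Int)) × List Int × Int) (bbox : List Int) :
    PySem.Dict Int (List (List Int)) × List Int × Int :=
  let (grouped, keys, key_) := st
  let y := pvY bbox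
  if grouped.items.length = 0 then
    (grouped.insert key_ [bbox], keys ++ (PySem.List.pyRange (-margin) (margin + 1)).map (fun i => y + i), key_)
  else if y ∈ keys then
    (grouped.modify key_ [] (fun g => g ++ [bbox]), keys, key_)
  else
    (grouped.insert (key_ + 1) [bbox], keys ++ (PySem.List.pyRange (-margin) (margin + 1)).map (fun i => y + i), key_ + 1)

def group_bbox (bboxes : List (List Int)) (margin : Int) : List (Int × List (List Int)) :=
  ((sortRois bboxes 1).foldl (stepA margin) (⟨[]⟩, [], 0)).1.items

-- ===== PORT B =====
-- one iteration of B's for-loop; state = (done, cur, seed)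
def stepB (margin : Int) (st : List (List (List Int)) × List (List Int) × Int) (bbox : List Int) :
    List (List (List Int)) × List (List Int) × Int :=
  let (done, cur, seed) := st
  let y := pvY bbox
  if cur ≠ [] ∧ seed - margin ≤ y ∧ y ≤ seed + margin then
    (done, cur ++ [bbox], seed)
  else
    ((if cur ≠ [] then done ++ [cur] else done), [bbox], y)

-- the trailing `if cur: done.append(cur)`
def finishB (st : List (List (List Int)) × List (List Int) × Int) : List (List (List Int)) :=
  if st.2.1 ≠ [] then st.1 ++ [st.2.1] else st.1

def group_bbox_alt (bboxes : List (List Int)) (margin : Int) : List (Int × List (List Int)) :=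
  PySem.List.enumerate (finishB ((sortRois bboxes 1).foldl (stepB margin) ([], [], 0))) 0

-- ===== PRECONDITION & SPEC =====
-- Python A evaluates roi[1] / bbox[1]: IndexError iff some bbox has fewer than 2 entries
def Pre_group_bbox (bboxes : List (List Int)) (margin : Int) : Prop :=
  ∀ b ∈ bboxes, 2 ≤ b.length
instance (bboxes : List (List Int)) (margin : Int) : Decidable (Pre_group_bbox bboxes margin) := by
  unfold Pre_group_bbox; infer_instance

def pvWitness_group_bbox : List (List Int) × Int := ([[0, 5], [1, 6], [2, 20]], 2)

def Spec_group_bbox (bboxes : List (List Int)) (margin : Int) (out : List (Int × List (List Int))) : Prop := out = group_bbox_alt bboxes margin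
instance (bboxes : List (List Int)) (margin : Int) (out : List (Int × List (List Int))) : Decidable (Spec_group_bbox bboxes margin out) := by unfold Spec_group_bbox; infer_instance

-- ===== CLAIM (what is proved, stated in full; the proofs are below) =====
def Claim_equal_group_bbox : Prop := ∀ (bboxes : List (List Int)) (margin : Int), Dom_group_bbox bboxes margin → Pre_group_bbox bboxes margin → Spec_group_bbox bboxes margin (group_bbox bboxes margin)

-- ===== LEMMAS AND PROOFS =====

-- the comparison sorted2 uses on (Int × List Int) pairs
def pvBefore (a b : Int × List Int) : Bool :=
  decide (a.1 < b.1) || (!decide (b.1 < a.1) && decide (a.2 < b.2))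

lemma pvInsertBy_pairwise (x : Int × List Int) (ys : List (Int × List Int))
    (h : ys.Pairwise (fun a b => a.1 ≤ b.1)) :
    (PySem.List.insertBy pvBefore x ys).Pairwise (fun a b => a.1 ≤ b.1) := by
  induction ys with
  | nil => simp [PySem.List.insertBy]
  | cons y ys ih =>
    obtain ⟨hy, htl⟩ := List.pairwise_cons.1 h
    by_cases hb : pvBefore x y = true
    · have hxy : x.1 ≤ y.1 := by
        rw [pvBefore, Bool.or_eq_true, Bool.and_eq_true] at hb
        rcases hb with h1 | ⟨h1, _⟩
        · exact le_of_lt (of_decide_eq_true h1)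
        · rw [Bool.not_eq_true', decide_eq_false_iff_not] at h1
          omega
      simp only [PySem.List.insertBy, hb, if_true]
      refine List.Pairwise.cons ?_ (List.Pairwise.cons hy htl)
      intro z hz
      rcases List.mem_cons.1 hz with rfl | hz
      · exact hxy
      · exact le_trans hxy (hy z hz)
    · have hyx : y.1 ≤ x.1 := by
        by_contra hcon
        apply hb
        rw [pvBefore, Bool.or_eq_true]
        exact Or.inl (decide_eq_true (by omega))
      simp only [PySem.List.insertBy, hb]
      refine List.Pairwise.cons ?_ (ih htl)
      intro z hz
      rcases (PySem.List.insertBy_mem_iff pvBefore x z ys).1 hz with rfl | hz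
      · exact hyx
      · exact hy z hz

lemma pvSorted2_pairwise (xs : List (Int × List Int)) :
    (PySem.List.sorted2 xs Prod.fst Prod.snd).Pairwise (fun a b => a.1 ≤ b.1) := by
  show (List.foldl (fun acc x => PySem.List.insertBy pvBefore x acc) [] xs).Pairwise _
  suffices h : ∀ (acc : List (Int × List Int)), acc.Pairwise (fun a b => a.1 ≤ b.1) →
      (List.foldl (fun acc x => PySem.List.insertBy pvBefore x acc) acc xs).Pairwise
        (fun a b => a.1 ≤ b.1) from h [] (by simp)
  induction xs with
  | nil => intro acc hacc; simpa using hacc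
  | cons x xs ih => intro acc hacc; exact ih _ (pvInsertBy_pairwise x acc hacc)

-- the sorted list is ordered by the y-value
lemma pvSortRois_pairwise (bboxes : List (List Int)) :
    (sortRois bboxes 1).Pairwise (fun a b => pvY a ≤ pvY b) := by
  unfold sortRois
  rw [if_pos rfl]
  have hzip : ∀ (l : List (List Int)), (l.map (fun roi => PySem.List.pyGetD roi 1 0)).zip l
      = l.map (fun r => (PySem.List.pyGetD r 1 0, r)) := by
    intro l
    induction l with
    | nil => rfl
    | cons a l ih => simp [ih]
  rw [hzip bboxes, List.pairwise_map]
  have hP := pvSorted2_pairwise (bboxes.map (fun r => (PySem.List.pyGetD r 1 0, r)))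
  have hmem : ∀ p ∈ PySem.List.sorted2 (bboxes.map (fun r => (PySem.List.pyGetD r 1 0, r)))
      Prod.fst Prod.snd, p.1 = pvY p.2 := by
    intro p hp
    have hp' := (PySem.List.sorted2_perm (bboxes.map (fun r => (PySem.List.pyGetD r 1 0, r)))
      Prod.fst Prod.snd false).mem_iff.1 hp
    rcases List.mem_map.1 hp' with ⟨r, _, rfl⟩
    rfl
  exact hP.imp_of_mem (fun {a b} ha hb hr => by
    rw [← hmem a ha, ← hmem b hb]; exact hr)

-- Dict facts on an items list whose last key is fresh
lemma pvGetD_append_fresh {β : Type} (xs : List (Int × β)) (k : Int) (v d : β)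
    (h : ∀ p ∈ xs, p.1 ≠ k) :
    (PySem.Dict.mk (xs ++ [(k, v)])).getD k d = v := by
  induction xs with
  | nil => simp [PySem.Dict.getD, PySem.Dict.get?]
  | cons p xs ih =>
    have hp : (p.1 == k) = false := by
      rw [beq_eq_false_iff_ne]
      exact h p (by simp)
    simp only [PySem.Dict.getD, PySem.Dict.get?, List.cons_append, List.find?, hp] at ih ⊢
    exact ih (fun q hq => h q (List.mem_cons_of_mem _ hq))

lemma pvMap_fresh {β : Type} (xs : List (Int × β)) (k : Int) (w : β)
    (h : ∀ p ∈ xs, p.1 ≠ k) :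
    xs.map (fun p => if (p.1 == k) = true then (k, w) else p) = xs := by
  induction xs with
  | nil => rfl
  | cons p xs ih =>
    have hp : (p.1 == k) = false := by
      rw [beq_eq_false_iff_ne]
      exact h p (by simp)
    rw [List.map_cons, ih (fun q hq => h q (List.mem_cons_of_mem _ hq)), hp]
    simp

lemma pvInsert_append_fresh {β : Type} (xs : List (Int × β)) (k : Int) (v w : β)
    (h : ∀ p ∈ xs, p.1 ≠ k) :
    (PySem.Dict.mk (xs ++ [(k, v)])).insert k w = PySem.Dict.mk (xs ++ [(k, w)]) := by
  have hc : (PySem.Dict.mk (xs ++ [(k, v)])).contains k = true := by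
    simp [PySem.Dict.contains]
  simp only [PySem.Dict.insert, hc, if_true]
  congr 1
  rw [List.map_append, pvMap_fresh xs k w h]
  simp

lemma pvInsert_fresh {β : Type} (xs : List (Int × β)) (k : Int) (v : β)
    (h : ∀ p ∈ xs, p.1 ≠ k) :
    (PySem.Dict.mk xs).insert k v = PySem.Dict.mk (xs ++ [(k, v)]) := by
  have hc : (PySem.Dict.mk xs).contains k = false := by
    simp only [PySem.Dict.contains, List.any_eq_false]
    intro p hp
    simp only [beq_iff_eq]
    exact h p hp
  simp [PySem.Dict.insert, hc]

lemma pvEnum_fst_lt {β : Type} (gs : List β) (p : Int × β) (hp : p ∈ PySem.List.enumerate gs 0) :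
    p.1 < (gs.length : Int) := by
  rcases (PySem.List.mem_enumerate_iff gs 0 p).1 hp with ⟨j, hj, rfl⟩
  simp
  omega

lemma pvEnum_snoc {β : Type} (gs : List β) (v : β) :
    PySem.List.enumerate (gs ++ [v]) 0
      = PySem.List.enumerate gs 0 ++ [((gs.length : Int), v)] := by
  rw [PySem.List.enumerate_append, PySem.List.enumerate_cons]
  norm_num

-- membership in the freshly generated key range
lemma pvMem_newKeys (m y z : Int) :
    z ∈ (PySem.List.pyRange (-m) (m + 1)).map (fun i => y + i) ↔ y - m ≤ z ∧ z ≤ y + m := by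
  simp only [List.mem_map, PySem.List.mem_pyRange_one]
  constructor
  · rintro ⟨i, ⟨h1, h2⟩, rfl⟩; omega
  · intro h; exact ⟨z - y, ⟨by omega, by omega⟩, by omega⟩

-- the loop invariant: A's (grouped_bbox, keys, key_) state tracks B's (done, cur, seed) state
lemma pvLoop_eq (m : Int) : ∀ (l : List (List Int)),
    l.Pairwise (fun a b => pvY a ≤ pvY b) →
    ∀ (done : List (List (List Int))) (cur : List (List Int)) (seed : Int) (keys : List Int),
    cur ≠ [] →
    (∀ b ∈ l, seed ≤ pvY b) →
    (∀ z : Int, seed ≤ z → (z ∈ keys ↔ seed - m ≤ z ∧ z ≤ seed + m)) →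
    (l.foldl (stepA m) (⟨PySem.List.enumerate (done ++ [cur]) 0⟩, keys, (done.length : Int))).1.items
      = PySem.List.enumerate (finishB (l.foldl (stepB m) (done, cur, seed))) 0 := by
  intro l
  induction l with
  | nil =>
    intro _ done cur seed keys hcur _ _
    simp [finishB, hcur]
  | cons b t ih =>
    intro hs done cur seed keys hcur hl hkeys
    obtain ⟨hbhead, hst⟩ := List.pairwise_cons.1 hs
    have hseedb : seed ≤ pvY b := hl b (by simp)
    have hfresh : ∀ p ∈ PySem.List.enumerate done 0, p.1 ≠ (done.length : Int) := by
      intro p hp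
      have := pvEnum_fst_lt done p hp
      omega
    have hlen : ¬ ((PySem.List.enumerate (done ++ [cur]) 0 : List (Int × List (List Int))).length = 0) := by
      rw [PySem.List.length_enumerate]
      simp
    rw [List.foldl_cons, List.foldl_cons]
    by_cases hin : pvY b ∈ keys
    · have hyr : seed - m ≤ pvY b ∧ pvY b ≤ seed + m := (hkeys _ hseedb).1 hin
      have hA : stepA m (⟨PySem.List.enumerate (done ++ [cur]) 0⟩, keys, (done.length : Int)) b
          = (⟨PySem.List.enumerate (done ++ [cur ++ [b]]) 0⟩, keys, (done.length : Int)) := by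
        simp only [stepA, if_neg hlen, if_pos hin]
        refine Prod.ext ?_ rfl
        show (PySem.Dict.mk (PySem.List.enumerate (done ++ [cur]) 0)).modify (done.length : Int) [] (fun g => g ++ [b]) = _
        rw [PySem.Dict.modify, pvEnum_snoc done cur, pvEnum_snoc done (cur ++ [b]),
          pvGetD_append_fresh _ _ _ _ hfresh, pvInsert_append_fresh _ _ _ _ hfresh]
      have hB : stepB m (done, cur, seed) b = (done, cur ++ [b], seed) := by
        simp only [stepB]
        rw [if_pos ⟨hcur, hyr.1, hyr.2⟩]
      rw [hA, hB]
      exact ih hst done (cur ++ [b]) seed keys (by simp) (fun b' hb' => hl b' (by simp [hb'])) hkeys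
    · have hyr : ¬ (seed - m ≤ pvY b ∧ pvY b ≤ seed + m) := fun hc => hin ((hkeys _ hseedb).2 hc)
      have hfresh2 : ∀ p ∈ PySem.List.enumerate (done ++ [cur]) 0,
          p.1 ≠ ((done.length : Int) + 1) := by
        intro p hp
        have := pvEnum_fst_lt (done ++ [cur]) p hp
        simp at this
        omega
      have hA : stepA m (⟨PySem.List.enumerate (done ++ [cur]) 0⟩, keys, (done.length : Int)) b
          = (⟨PySem.List.enumerate ((done ++ [cur]) ++ [[b]]) 0⟩,
             keys ++ (PySem.List.pyRange (-m) (m + 1)).map (fun i => pvY b + i),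
             (done.length : Int) + 1) := by
        simp only [stepA, if_neg hlen, if_neg hin]
        refine Prod.ext ?_ rfl
        show (PySem.Dict.mk (PySem.List.enumerate (done ++ [cur]) 0)).insert ((done.length : Int) + 1) [b] = _
        rw [pvInsert_fresh _ _ _ hfresh2, pvEnum_snoc (done ++ [cur]) [b]]
        congr 2
        simp
      have hB : stepB m (done, cur, seed) b = (done ++ [cur], [b], pvY b) := by
        simp only [stepB]
        rw [if_neg (by
          rintro ⟨_, h1, h2⟩
          exact hyr ⟨h1, h2⟩), if_pos hcur]
      rw [hA, hB]
      have hkeys' : ∀ z : Int, pvY b ≤ z →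
          (z ∈ keys ++ (PySem.List.pyRange (-m) (m + 1)).map (fun i => pvY b + i)
            ↔ pvY b - m ≤ z ∧ z ≤ pvY b + m) := by
        intro z hz
        rw [List.mem_append, pvMem_newKeys]
        constructor
        · rintro (hk | hk)
          · have := (hkeys z (le_trans hseedb hz)).1 hk
            omega
          · exact hk
        · exact fun hk => Or.inr hk
      have := ih hst (done ++ [cur]) [b] (pvY b) _ (by simp) hbhead hkeys'
      rw [← this]
      norm_num

-- ===== VERDICT (by name: the statement is the Claim_ definition above) =====
theorem group_bbox_spec : Claim_equal_group_bbox := by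
  intro bboxes margin _ _
  unfold Spec_group_bbox group_bbox group_bbox_alt
  have hs := pvSortRois_pairwise bboxes
  cases h : sortRois bboxes 1 with
  | nil =>
    simp [finishB, PySem.List.enumerate_nil]
  | cons b t =>
    rw [h] at hs
    obtain ⟨hbhead, hst⟩ := List.pairwise_cons.1 hs
    rw [List.foldl_cons, List.foldl_cons]
    have hA0 : stepA margin (⟨[]⟩, [], 0) b
        = (⟨[((0 : Int), [b])]⟩,
           (PySem.List.pyRange (-margin) (margin + 1)).map (fun i => pvY b + i), 0) := by
      simp only [stepA, List.length_nil]
      rw [pvInsert_fresh ([] : List (Int × List (List Int))) 0 [b] (by simp)]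
      simp
    have hB0 : stepB margin ([], [], 0) b = ([], [b], pvY b) := by
      simp only [stepB]
      rw [if_neg (by rintro ⟨hc, _⟩; exact hc rfl)]
      simp
    rw [hA0, hB0]
    have := pvLoop_eq margin t hst [] [b] (pvY b)
      ((PySem.List.pyRange (-margin) (margin + 1)).map (fun i => pvY b + i))
      (by simp) hbhead (fun z _ => pvMem_newKeys margin (pvY b) z)
    simpa [PySem.List.enumerate_cons, PySem.List.enumerate_nil] using this
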